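-- pv_equiv track=rewrite | github.com/CountChu/LeetCodePython | top_interview_questions/solutions/0034-search-range-p.py | find_right
-- ===== SOURCE A (Python) =====
-- def find_right(nums, k):
--     n = len(nums)
--     if k == n - 1:
--         return k
--
--     v0 = nums[k]
--
--     while True:
--         k += 1
--         v1 = nums[k]
--         if v0 != v1:
--             return k - 1
--
--         if k == n - 1:
--             return k
-- ===== SOURCE B (Python) =====
-- def find_right(nums, k):
--     # Run-length view of the whole array: collect the right end of every
--     # maximal run of equal adjacent values, then answer = first run end >= k.
--     n = len(nums)
--     ends = [i for i in range(n) if i == n - 1 or nums[i] != nums[i + 1]]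
--     for e in ends:
--         if e >= k:
--             return e
-- ===== Notes on version B (the rewrite author's own statement) =====
-- stated objective: alternative
-- what changed: Instead of scanning forward from k comparing each element with nums[k], B builds the run-length boundary list of the whole array (indices where a maximal run of equal adjacent values ends) and returns the first run end >= k; Pre_ restricts to the natural domain 0 <= k < len(nums), since negative k relies on Python's wraparound indexing where the two strategies legitimately diverge.
-- outside the precondition, e.g. on find_right([5, 3, 3], -2): A returns -1, B returns 0; on find_right([], -1): A returns -1, B returns None
import Mathlib
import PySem

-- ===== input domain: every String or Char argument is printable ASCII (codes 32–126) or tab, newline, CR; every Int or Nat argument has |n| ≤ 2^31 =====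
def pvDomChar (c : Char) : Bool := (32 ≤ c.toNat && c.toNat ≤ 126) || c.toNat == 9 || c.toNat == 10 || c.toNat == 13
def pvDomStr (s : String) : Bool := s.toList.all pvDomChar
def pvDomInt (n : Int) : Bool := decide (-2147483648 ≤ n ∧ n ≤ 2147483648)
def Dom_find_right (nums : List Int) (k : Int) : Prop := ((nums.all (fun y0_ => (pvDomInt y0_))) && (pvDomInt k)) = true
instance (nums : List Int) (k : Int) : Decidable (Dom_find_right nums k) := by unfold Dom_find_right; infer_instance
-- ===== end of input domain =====

-- B replaces A's forward scan from k (comparing each element with nums[k]) by a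
-- run-length view of the whole array: the list of right ends of all maximal runs
-- of equal adjacent values, from which the answer is the first run end >= k.

-- ===== PORT A =====
-- the 'while True' loop; fuel = len(nums) bounds the iterations (the loop stops
-- before index len(nums)-1, so fuel never runs out under Pre_)
def find_right_go (nums : List Int) (v0 : Int) : Int → Nat → Int
  | _, 0 => 0
  | k, fuel+1 =>
    let k' := k + 1
    let v1 := PySem.List.pyGetD nums k' 0
    if v0 ≠ v1 then k' - 1
    else if k' = (nums.length : Int) - 1 then k'
    else find_right_go nums v0 k' fuel

def find_right (nums : List Int) (k : Int) : Int :=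
  let n : Int := nums.length
  if k = n - 1 then k
  else
    let v0 := PySem.List.pyGetD nums k 0
    find_right_go nums v0 k nums.length

-- ===== PORT B =====
-- 'for e in ends: if e >= k: return e'; the fall-through (Python returns None)
-- is unreachable under Pre_ (the last run end is n-1 ≥ k)
def find_right_alt_first (k : Int) : List Int → Int
  | [] => 0
  | e :: es => if k ≤ e then e else find_right_alt_first k es

def find_right_alt (nums : List Int) (k : Int) : Int :=
  let n : Int := nums.length
  let ends := (PySem.List.pyRange 0 n 1).filter
    (fun i => i == n - 1 || !(PySem.List.pyGetD nums i 0 == PySem.List.pyGetD nums (i + 1) 0))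
  find_right_alt_first k ends

-- ===== PRECONDITION & SPEC =====
-- Pre_ is the function's natural domain: a nonnegative in-range index k. Negative k
-- relies on Python's wraparound indexing, where A's scan starts at nums[k] from the
-- end while B searches run ends from the front (they legitimately diverge); k ≥
-- len(nums) (or [] with k = -1) is outside the task's domain (A raises IndexError
-- for k ≥ len(nums) with k ≠ len(nums) - 1, B's loop falls through returning None).
def Pre_find_right (nums : List Int) (k : Int) : Prop :=
  0 ≤ k ∧ k < (nums.length : Int)
instance (nums : List Int) (k : Int) : Decidable (Pre_find_right nums k) := by
  unfold Pre_find_right; infer_instance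
def pvWitness_find_right : List Int × Int := ([1, 1, 2], 0)

def Spec_find_right (nums : List Int) (k : Int) (out : Int) : Prop := out = find_right_alt nums k
instance (nums : List Int) (k : Int) (out : Int) : Decidable (Spec_find_right nums k out) := by unfold Spec_find_right; infer_instance

-- ===== CLAIM (what is proved, stated in full; the proofs are below) =====
def Claim_equal_find_right : Prop := ∀ (nums : List Int) (k : Int), Dom_find_right nums k → Pre_find_right nums k → Spec_find_right nums k (find_right nums k)

-- ===== LEMMAS AND PROOFS =====

-- reference value both ports are reduced to: the length of the equal prefix
def runLen (v : Int) : List Int → Nat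
  | [] => 0
  | x :: xs => if x = v then runLen v xs + 1 else 0

theorem runLen_le (v : Int) : ∀ (xs : List Int), runLen v xs ≤ xs.length := by
  intro xs
  induction xs with
  | nil => simp [runLen]
  | cons x xs ih => simp only [runLen, List.length_cons]; split_ifs <;> omega

theorem runLen_get (v : Int) : ∀ (xs : List Int) (i : Nat) (h : i < xs.length),
    i < runLen v xs → xs[i] = v := by
  intro xs
  induction xs with
  | nil => intro i h; simp at h
  | cons x xs ih =>
    intro i h hi
    simp only [runLen] at hi
    split_ifs at hi with hx
    · cases i with
      | zero => simpa using hx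
      | succ j => simpa using ih j (by simpa using h) (by omega)
    · omega

theorem runLen_stop (v : Int) : ∀ (xs : List Int) (h : runLen v xs < xs.length),
    xs[runLen v xs] ≠ v := by
  intro xs
  induction xs with
  | nil => intro h; simp at h
  | cons x xs ih =>
    intro h
    simp only [runLen] at h ⊢
    split_ifs with hx
    · simpa [runLen, hx] using ih (by simpa [runLen, hx] using h)
    · simpa using hx

-- A's scan loop, started at position k inside the run, lands at k plus the
-- length of the equal prefix of the elements after k
theorem find_right_go_eq (nums : List Int) (v0 : Int) :
    ∀ (fuel : Nat) (k : Int), 0 ≤ k → k < (nums.length : Int) - 1 →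
      (nums.length : Int) - 1 - k ≤ fuel →
      find_right_go nums v0 k fuel =
        k + runLen v0 (nums.drop (k.toNat + 1)) := by
  intro fuel
  induction fuel with
  | zero => intro k h0 hk hf; exfalso; omega
  | succ fuel ih =>
    intro k h0 hk hf
    have hk'n : (k + 1).toNat < nums.length := by omega
    have hdrop : nums.drop (k.toNat + 1) = nums[(k + 1).toNat] :: nums.drop ((k + 1).toNat + 1) := by
      have h : k.toNat + 1 = (k + 1).toNat := by omega
      rw [h]
      exact (List.getElem_cons_drop hk'n).symm
    have hv1 : PySem.List.pyGetD nums (k + 1) 0 = nums[(k + 1).toNat] :=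
      PySem.List.pyGetD_eq_getElem nums 0 (by omega) (by omega)
    simp only [find_right_go]
    split_ifs with h1 h2
    · -- mismatch right after k: the equal prefix is empty
      rw [hdrop]
      simp only [runLen]
      rw [if_neg (fun h => h1 (hv1.trans h).symm)]
      omega
    · -- k+1 is the last index and still equal: the equal prefix is [nums[k+1]]
      have hlast : nums.drop ((k + 1).toNat + 1) = [] := by
        apply List.drop_eq_nil_of_le
        omega
      push Not at h1
      rw [hdrop, hlast]
      simp only [runLen]
      rw [if_pos (h1.trans hv1).symm]
      push_cast
      omega
    · -- still equal, not last: one more prefix element, then the recursive call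
      push Not at h1
      rw [ih (k + 1) (by omega) (by omega) (by omega), hdrop]
      simp only [runLen]
      rw [if_pos (h1.trans hv1).symm]
      push_cast
      omega

-- B's for-loop on a strictly increasing list returns r when r is a member ≥ k
-- and every member ≥ k is ≥ r
theorem first_eq (k r : Int) : ∀ (l : List Int), l.Pairwise (· < ·) → r ∈ l → k ≤ r →
    (∀ e ∈ l, k ≤ e → r ≤ e) → find_right_alt_first k l = r := by
  intro l
  induction l with
  | nil => intro _ hr; simp at hr
  | cons e es ih =>
    intro hp hr hk hmin
    simp only [find_right_alt_first]
    split_ifs with he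
    · -- first member ≥ k: it must be r
      have hre : r ≤ e := hmin e (by simp) he
      rcases List.mem_cons.mp hr with h | h
      · omega
      · have : e < r := (List.pairwise_cons.mp hp).1 r h
        omega
    · -- e < k ≤ r, so r sits in the tail
      have hrtail : r ∈ es := by
        rcases List.mem_cons.mp hr with h | h
        · omega
        · exact h
      exact ih (List.pairwise_cons.mp hp).2 hrtail hk
        (fun x hx hkx => hmin x (List.mem_cons_of_mem e hx) hkx)

-- B returns k plus the length of the equal prefix of the elements after k
theorem find_right_alt_eq (nums : List Int) (k : Int)
    (h0 : 0 ≤ k) (hn : k < (nums.length : Int)) :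
    find_right_alt nums k = k + runLen (nums[k.toNat]'(by omega)) (nums.drop (k.toNat + 1)) := by
  simp only [find_right_alt]
  set n : Int := (nums.length : Int) with hn_def
  set v := nums[k.toNat]'(by omega) with hv
  set m := runLen v (nums.drop (k.toNat + 1)) with hm
  set p : Int → Bool :=
    (fun i => i == n - 1 || !(PySem.List.pyGetD nums i 0 == PySem.List.pyGetD nums (i + 1) 0)) with hp
  have hmlen : m ≤ nums.length - (k.toNat + 1) := by
    have := runLen_le v (nums.drop (k.toNat + 1))
    simpa using this
  have hr_lt : k + (m : Int) < n := by omega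
  -- every position from k to k + m holds v
  have hrun : ∀ (j : Nat) (hj : j < nums.length), k.toNat ≤ j → (j : Int) ≤ k + m → nums[j] = v := by
    intro j hj hkj hjm
    rcases Nat.eq_or_lt_of_le hkj with h | h
    · simp [← h, hv]
    · have hd : j - (k.toNat + 1) < (nums.drop (k.toNat + 1)).length := by
        simp; omega
      have := runLen_get v (nums.drop (k.toNat + 1)) (j - (k.toNat + 1)) hd (by omega)
      rw [List.getElem_drop] at this
      have hidx : k.toNat + 1 + (j - (k.toNat + 1)) = j := by omega
      simp only [hidx] at this
      exact this
  -- k + m satisfies the filter predicate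
  have hpr : p (k + m) = true := by
    by_cases hlast : k + (m : Int) = n - 1
    · simp [hp, hlast]
    · have hm_lt : m < (nums.drop (k.toNat + 1)).length := by simp; omega
      have hstop := runLen_stop v (nums.drop (k.toNat + 1)) hm_lt
      rw [List.getElem_drop] at hstop
      have hg1 : PySem.List.pyGetD nums (k + m) 0 = v := by
        rw [PySem.List.pyGetD_eq_getElem nums 0 (by omega) (by omega)]
        exact hrun (k + (m : Int)).toNat (by omega) (by omega) (by omega)
      have hg2 : PySem.List.pyGetD nums (k + m + 1) 0 = nums[k.toNat + 1 + m]'(by omega) := by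
        rw [PySem.List.pyGetD_eq_getElem nums 0 (by omega) (by omega)]
        congr 1
        omega
      simp only [hp, Bool.or_eq_true, beq_iff_eq, Bool.not_eq_true', beq_eq_false_iff_ne, ne_eq]
      right
      rw [hg1, hg2]
      exact fun h => hstop (h.symm)
  -- every run end ≥ k is ≥ k + m
  have hmin : ∀ e ∈ (PySem.List.pyRange 0 n 1).filter p, k ≤ e → k + (m : Int) ≤ e := by
    intro e he hke
    by_contra hlt
    push Not at hlt
    have hmem := List.mem_filter.mp he
    have hrange := PySem.List.mem_pyRange_one.mp hmem.1
    have hpe := hmem.2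
    have hene : ¬ (e = n - 1) := by omega
    have hg1 : PySem.List.pyGetD nums e 0 = v := by
      rw [PySem.List.pyGetD_eq_getElem nums 0 (by omega) (by omega)]
      exact hrun e.toNat (by omega) (by omega) (by omega)
    have hg2 : PySem.List.pyGetD nums (e + 1) 0 = v := by
      rw [PySem.List.pyGetD_eq_getElem nums 0 (by omega) (by omega)]
      exact hrun (e + 1).toNat (by omega) (by omega) (by omega)
    simp only [hp, hg1, hg2] at hpe
    simp at hpe
    exact hene hpe
  -- conclude with the for-loop characterisation
  exact first_eq k (k + m) _
    (List.Pairwise.sublist List.filter_sublist (PySem.List.pairwise_lt_pyRange_one 0 n))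
    (List.mem_filter.mpr ⟨PySem.List.mem_pyRange_one.mpr ⟨by omega, hr_lt⟩, hpr⟩)
    (by omega) hmin

-- ===== VERDICT (by name: the statement is the Claim_ definition above) =====
theorem find_right_spec : Claim_equal_find_right := by
  intro nums k _ ⟨h0, hn⟩
  unfold Spec_find_right
  rw [find_right_alt_eq nums k h0 hn]
  simp only [find_right]
  split_ifs with hl
  · -- k is already the last index: nothing after k, the equal prefix is empty
    have : nums.drop (k.toNat + 1) = [] := by
      apply List.drop_eq_nil_of_le
      omega
    rw [this]
    simp [runLen]
  · have hv0 : PySem.List.pyGetD nums k 0 = nums[k.toNat]'(by omega) :=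
      PySem.List.pyGetD_eq_getElem nums 0 (by omega) (by omega)
    rw [hv0]
    exact find_right_go_eq nums _ nums.length k h0 (by omega) (by omega)
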